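-- pv_equiv track=rewrite | github.com/julianstephens/weather-prediction-ml | main.py | make_date_str
-- ===== SOURCE A (Python) =====
-- def make_date_str(date):
--     """Convert dates from Y-m-d to Ymd
--
--     :param date (str): A Y-m-d formatted date
--
--     Returns
--         date_str(str): A Ymd formatted date
--     """
--     date_arr = date.split('-')
--     date_str = ''
--
--     first = True
--     for itm in date_arr:
--         if first:
--             first = False
--         else:
--             date_str = date_str + itm
--
--     return date_str
-- ===== SOURCE B (Python) =====
-- def make_date_str(date):
--     """Convert dates from Y-m-d to Ymd: cut at the first '-' and strip the rest."""
--     i = date.find('-')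
--     if i == -1:
--         return ''
--     return date[i + 1:].replace('-', '')
-- ===== Notes on version B (the rewrite author's own statement) =====
-- stated objective: idiomatic
-- what changed: Replaces the split-into-all-segments plus first-flag accumulation loop by locating the first dash with str.find, slicing off the prefix, and removing the remaining dashes with one bulk str.replace.
import Mathlib
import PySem

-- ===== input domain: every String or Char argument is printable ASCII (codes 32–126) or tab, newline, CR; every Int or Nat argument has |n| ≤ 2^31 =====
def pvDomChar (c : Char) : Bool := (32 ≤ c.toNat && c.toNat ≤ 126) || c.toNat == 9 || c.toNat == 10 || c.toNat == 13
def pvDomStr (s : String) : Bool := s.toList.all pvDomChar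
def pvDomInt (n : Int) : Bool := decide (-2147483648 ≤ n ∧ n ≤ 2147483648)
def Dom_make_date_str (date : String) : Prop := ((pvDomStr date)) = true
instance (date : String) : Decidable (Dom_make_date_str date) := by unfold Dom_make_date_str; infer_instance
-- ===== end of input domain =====

-- B replaces A's split-all-segments + first-flag accumulation loop by cut-at-first-dash
-- (str.find + slice) plus one bulk str.replace; equally fast, more idiomatic.

-- ===== PORT A =====
-- literal transliteration of A: split on '-', then a first-flag fold concatenating all
-- later segments (string concatenation is carried as List Char, converted at the end).
def make_date_str (date : String) : String :=
  let date_arr : List (List Char) := (PySem.Chars.split? date.toList ['-']).getD []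
  let r := date_arr.foldl
    (fun (st : Bool × List Char) itm => if st.1 then (false, st.2) else (st.1, st.2 ++ itm))
    (true, ([] : List Char))
  String.ofList r.2

-- ===== PORT B =====
def make_date_str_alt (date : String) : String :=
  let i := PySem.Str.find date "-"
  if i = -1 then ""
  else PySem.Str.replace (PySem.Str.slice date (some (i + 1)) none) "-" ""

-- ===== PRECONDITION & SPEC =====
def Spec_make_date_str (date : String) (out : String) : Prop := out = make_date_str_alt date
instance (date : String) (out : String) : Decidable (Spec_make_date_str date out) := by unfold Spec_make_date_str; infer_instance

-- ===== CLAIM (what is proved, stated in full; the proofs are below) =====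
def Claim_equal_make_date_str : Prop := ∀ (date : String), Dom_make_date_str date → Spec_make_date_str date (make_date_str date)

-- ===== LEMMAS AND PROOFS =====

/-- The list of segments `splitOn` computes, as a plain structural recursion. -/
def pvSegs (c : Char) : List Char → List Char → List (List Char)
  | pre, [] => [pre]
  | pre, x :: t => if x = c then pre :: pvSegs c [] t else pvSegs c (pre ++ [x]) t

theorem pvSplitOn_go_eq (c : Char) :
    ∀ (fuel : Nat) (l cur : List Char) (acc : List (List Char)), l.length ≤ fuel →
      PySem.Chars.splitOn.go [c] fuel l cur acc = acc.reverse ++ pvSegs c cur.reverse l := by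
  intro fuel
  induction fuel with
  | zero =>
    intro l cur acc h
    have : l = [] := List.eq_nil_of_length_eq_zero (Nat.le_zero.mp h)
    subst this
    simp [PySem.Chars.splitOn.go, pvSegs]
  | succ n ih =>
    intro l cur acc h
    cases l with
    | nil => simp [PySem.Chars.splitOn.go, pvSegs]
    | cons x t =>
      simp only [PySem.Chars.splitOn.go]
      by_cases hx : x = c
      · subst hx
        have hpre : [x].isPrefixOf (x :: t) = true := by simp [List.isPrefixOf]
        rw [if_pos hpre]
        simp only [List.length, List.drop_succ_cons, List.drop_zero]
        rw [ih t [] (cur.reverse :: acc) (by simpa using Nat.le_of_succ_le_succ h)]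
        simp [pvSegs]
      · have hpre : [c].isPrefixOf (x :: t) = false := by
          simp [List.isPrefixOf]
          exact fun hh => (hx hh.symm).elim
        rw [if_neg (by simp [hpre])]
        rw [ih t (x :: cur) acc (by simpa using Nat.le_of_succ_le_succ h)]
        simp [pvSegs, hx]

theorem pvSplitOn_eq (c : Char) (s : List Char) :
    PySem.Chars.splitOn s [c] = pvSegs c [] s := by
  unfold PySem.Chars.splitOn
  rw [pvSplitOn_go_eq c (s.length + 1) s [] [] (by omega)]
  simp

/-- A's first-flag fold, once the flag is down, just concatenates. -/
theorem pvFold_false (xs : List (List Char)) : ∀ (b : List Char),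
    xs.foldl (fun (st : Bool × List Char) itm =>
      if st.1 then (false, st.2) else (st.1, st.2 ++ itm)) (false, b)
      = (false, b ++ xs.flatten) := by
  induction xs with
  | nil => intro b; simp
  | cons x t ih => intro b; simp [ih (b ++ x)]

theorem pvSegs_flatten (c : Char) :
    ∀ (l pre : List Char), (pvSegs c pre l).flatten = pre ++ l.filter (fun x => x != c) := by
  intro l
  induction l with
  | nil => intro pre; simp [pvSegs]
  | cons x t ih =>
    intro pre
    by_cases hx : x = c
    · subst hx; simp [pvSegs, ih]
    · simp [pvSegs, hx, ih, List.filter_cons, hx]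

theorem pvSegs_tail_flatten (c : Char) :
    ∀ (l pre : List Char),
      ((pvSegs c pre l).tail).flatten
        = ((l.dropWhile (fun x => x != c)).tail).filter (fun x => x != c) := by
  intro l
  induction l with
  | nil => intro pre; simp [pvSegs]
  | cons x t ih =>
    intro pre
    by_cases hx : x = c
    · subst hx; simp [pvSegs, pvSegs_flatten, List.dropWhile_cons]
    · simp [pvSegs, hx, ih, List.dropWhile_cons]

/-- A computes: drop through the first dash, then remove remaining dashes. -/
theorem pvA_char (date : String) :
    make_date_str date
      = String.ofList (((date.toList.dropWhile (fun x => x != '-')).tail).filter (fun x => x != '-')) := by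
  unfold make_date_str
  simp only [PySem.Chars.split?, List.isEmpty_cons, Option.getD_some, if_neg Bool.false_ne_true]
  rw [pvSplitOn_eq]
  cases hs : pvSegs '-' [] date.toList with
  | nil =>
    have : (pvSegs '-' [] date.toList).flatten = [] := by rw [hs]; rfl
    rw [pvSegs_flatten] at this
    have ht : ((pvSegs '-' [] date.toList).tail).flatten = [] := by rw [hs]; rfl
    rw [pvSegs_tail_flatten] at ht
    simp [← ht, hs]
  | cons h t =>
    simp only [List.foldl_cons, reduceIte]
    rw [pvFold_false]
    have := pvSegs_tail_flatten '-' date.toList []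
    rw [hs] at this
    simp only [List.tail_cons] at this
    simp [this]

theorem pvFind_go (c : Char) :
    ∀ (l : List Char) (k : Nat),
      PySem.Chars.find.go [c] l k
        = if c ∈ l then ((k : Int) + (l.takeWhile (fun x => x != c)).length) else -1 := by
  intro l
  induction l with
  | nil => intro k; simp [PySem.Chars.find.go]
  | cons x t ih =>
    intro k
    by_cases hx : x = c
    · subst hx
      simp [PySem.Chars.find.go, List.isPrefixOf]
    · have hpre : [c].isPrefixOf (x :: t) = false := by
        simp [List.isPrefixOf]
        exact fun hh => (hx hh.symm).elim
      simp only [PySem.Chars.find.go, hpre, Bool.false_eq_true, if_false, ih (k + 1)]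
      by_cases hm : c ∈ t
      · simp [hm, hx, List.takeWhile_cons, Ne.symm hx]
        push_cast; ring
      · simp [hm, hx, Ne.symm hx]

theorem pvReplace_go (c : Char) :
    ∀ (fuel : Nat) (l acc : List Char), l.length ≤ fuel →
      PySem.Chars.replace.go [c] [] fuel l acc = acc.reverse ++ l.filter (fun x => x != c) := by
  intro fuel
  induction fuel with
  | zero =>
    intro l acc h
    have : l = [] := List.eq_nil_of_length_eq_zero (Nat.le_zero.mp h)
    subst this
    simp [PySem.Chars.replace.go]
  | succ n ih =>
    intro l acc h
    cases l with
    | nil => simp [PySem.Chars.replace.go]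
    | cons x t =>
      simp only [PySem.Chars.replace.go]
      by_cases hx : x = c
      · subst hx
        have hpre : [x].isPrefixOf (x :: t) = true := by simp [List.isPrefixOf]
        rw [if_pos hpre]
        simp only [List.length, List.drop_succ_cons, List.drop_zero, List.reverse_nil,
          List.nil_append]
        rw [ih t acc (by simpa using Nat.le_of_succ_le_succ h)]
        simp [List.filter_cons]
      · have hpre : [c].isPrefixOf (x :: t) = false := by
          simp [List.isPrefixOf]
          exact fun hh => (hx hh.symm).elim
        rw [if_neg (by simp [hpre])]
        rw [ih t (x :: acc) (by simpa using Nat.le_of_succ_le_succ h)]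
        simp [List.filter_cons, hx]

theorem pvReplace_eq (c : Char) (l : List Char) :
    PySem.Chars.replace l [c] [] = l.filter (fun x => x != c) := by
  unfold PySem.Chars.replace
  rw [if_neg (by simp)]
  rw [pvReplace_go c l.length l [] (le_refl _)]
  simp

-- ===== VERDICT (by name: the statement is the Claim_ definition above) =====
theorem make_date_str_spec : Claim_equal_make_date_str := by
  intro date _
  unfold Spec_make_date_str make_date_str_alt
  rw [pvA_char]
  have hfind : PySem.Str.find date "-" = PySem.Chars.find date.toList ['-'] := by
    simp [PySem.Str.find_eq]
  unfold PySem.Chars.find at hfind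
  rw [pvFind_go '-' date.toList 0] at hfind
  by_cases hm : '-' ∈ date.toList
  · set tw := date.toList.takeWhile (fun x => x != '-') with htw
    have hfi : PySem.Str.find date "-" = (tw.length : Int) := by rw [hfind]; simp [hm]
    have hne : PySem.Str.find date "-" ≠ -1 := by rw [hfi]; omega
    rw [if_neg hne]
    unfold PySem.Str.replace PySem.Str.slice
    rw [hfi]
    have hnn : (0 : Int) ≤ (tw.length : Int) + 1 := by omega
    rw [PySem.Chars.slice_eq_listSlice, PySem.List.slice_from _ hnn]
    have hto : ((tw.length : Int) + 1).toNat = tw.length + 1 := by omega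
    rw [hto]
    have hdrop : date.toList.drop (tw.length + 1)
        = (date.toList.dropWhile (fun x => x != '-')).tail := by
      conv_lhs => rw [← List.takeWhile_append_dropWhile (p := fun x => x != '-') (l := date.toList)]
      rw [List.drop_append, ← htw]
      simp [List.drop_one]
    rw [hdrop, String.toList_ofList,
      show ("-" : String).toList = ['-'] from rfl, show ("" : String).toList = [] from rfl,
      pvReplace_eq]
  · have hfi : PySem.Str.find date "-" = -1 := by rw [hfind]; simp [hm]
    rw [if_pos hfi]
    have hdw : date.toList.dropWhile (fun x => x != '-') = [] := by
      rw [List.dropWhile_eq_nil_iff]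
      intro x hx
      simp only [bne_iff_ne, ne_eq, decide_eq_true_eq]
      exact fun h => hm (h ▸ hx)
    simp [hdw]
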